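-- pv_equiv track=rewrite | github.com/gylfirst/ISN | exercices/révision isn python.py | comptage_pixel
-- ===== SOURCE A (Python) =====
-- def comptage_pixel (image) :
--     nl = len(image)
--     nc = len(image[0])
--     nb_pixel = 0
--     for l in  range (nl) :
--         for c in range (nc) :
--             nb_pixel = nb_pixel + 1
--     return nb_pixel
-- ===== SOURCE B (Python) =====
-- def comptage_pixel(image):
--     return len(image) * len(image[0])
-- ===== Notes on version B (the rewrite author's own statement) =====
-- stated objective: simpler
-- what changed: Replaced the nested counting loops with the closed-form product len(image) * len(image[0]).
import Mathlib
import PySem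

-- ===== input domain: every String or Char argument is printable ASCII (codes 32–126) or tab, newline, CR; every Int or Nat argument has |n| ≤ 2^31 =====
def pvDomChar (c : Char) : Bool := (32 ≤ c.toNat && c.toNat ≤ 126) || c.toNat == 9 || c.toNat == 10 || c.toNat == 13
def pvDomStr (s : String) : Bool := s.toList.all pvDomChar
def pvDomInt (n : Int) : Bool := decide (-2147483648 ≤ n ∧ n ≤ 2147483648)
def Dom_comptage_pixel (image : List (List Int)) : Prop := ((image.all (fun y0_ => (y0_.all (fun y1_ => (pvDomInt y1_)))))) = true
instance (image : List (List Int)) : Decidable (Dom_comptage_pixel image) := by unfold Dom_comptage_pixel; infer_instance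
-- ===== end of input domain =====

-- B replaces A's nested counting loops by the closed-form product len(image)*len(image[0]) (simpler, asymptotically faster on paper).


-- ===== PORT A =====
-- image[0] raises IndexError on an empty image; Pre_ excludes that input, so .getD [] is never taken there.
def comptage_pixel (image : List (List Int)) : Int :=
  let nl : Int := image.length
  let nc : Int := ((PySem.List.pyGet? image 0).getD []).length
  (PySem.List.pyRange 0 nl 1).foldl
    (fun nb _ => (PySem.List.pyRange 0 nc 1).foldl (fun nb _ => nb + 1) nb) 0

-- ===== PORT B =====
def comptage_pixel_alt (image : List (List Int)) : Int :=
  (image.length : Int) * (((PySem.List.pyGet? image 0).getD []).length : Int)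

-- ===== PRECONDITION & SPEC =====
-- Pre_ excludes the empty image, on which both Pythons raise IndexError at image[0].
def Pre_comptage_pixel (image : List (List Int)) : Prop := image ≠ []
instance (image : List (List Int)) : Decidable (Pre_comptage_pixel image) := by unfold Pre_comptage_pixel; infer_instance
def pvWitness_comptage_pixel : List (List Int) := [[1, 2], [3, 4]]
def Spec_comptage_pixel (image : List (List Int)) (out : Int) : Prop := out = comptage_pixel_alt image
instance (image : List (List Int)) (out : Int) : Decidable (Spec_comptage_pixel image out) := by unfold Spec_comptage_pixel; infer_instance

-- ===== CLAIM (what is proved, stated in full; the proofs are below) =====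
def Claim_equal_comptage_pixel : Prop := ∀ (image : List (List Int)), Dom_comptage_pixel image → Pre_comptage_pixel image → Spec_comptage_pixel image (comptage_pixel image)

-- ===== LEMMAS AND PROOFS =====
theorem foldl_const_add (c : Int) (l : List Int) (a : Int) :
    l.foldl (fun acc _ => acc + c) a = a + l.length * c := by
  induction l generalizing a with
  | nil => simp
  | cons x xs ih => simp [List.foldl, ih]; ring

theorem outer_fold (l : List Int) (nc a : Int) :
    l.foldl (fun nb _ => (PySem.List.pyRange 0 nc 1).foldl (fun nb _ => nb + 1) nb) a
      = a + l.length * ((PySem.List.pyRange 0 nc 1).length : Int) := by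
  induction l generalizing a with
  | nil => simp
  | cons x xs ih => simp [List.foldl, ih, foldl_const_add]; ring

-- ===== VERDICT (by name: the statement is the Claim_ definition above) =====
theorem comptage_pixel_spec : Claim_equal_comptage_pixel := by
  intro image _ _
  unfold Spec_comptage_pixel comptage_pixel comptage_pixel_alt
  rw [outer_fold]
  simp [PySem.List.length_pyRange_one]
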